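-- pv_equiv track=rewrite | github.com/joe-arbo/joe-arbo | Artificial Intelligence/p5/dpll.py | clauseEval
-- ===== SOURCE A (Python) =====
-- def clauseEval(clause, model):
--     value = False
--     for val in clause:
--         if abs(val) in model:
--             model_val = model[abs(val)]
--         else:
--             model_val = None
--
--         if (model_val and val > 0) or (model_val is False and val < 0):
--             return True
--         if model_val is None:
--             value = None
--
--     return value
-- ===== SOURCE B (Python) =====
-- def clauseEval(clause, model):
--     true_vars = {v for v, b in model.items() if b}
--     false_vars = {v for v, b in model.items() if not b}
--     pos = {v for v in clause if v > 0}
--     neg = {-v for v in clause if v < 0}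
--     if (pos & true_vars) or (neg & false_vars):
--         return True
--     if {abs(v) for v in clause} - model.keys():
--         return None
--     return False
-- ===== Notes on version B (the rewrite author's own statement) =====
-- stated objective: alternative
-- what changed: A's single pass over the clause with a mutable three-valued accumulator is replaced by set algebra: build the model's true-variable and false-variable sets and the clause's positive/negated variable sets, decide satisfaction by two set intersections and undeterminedness by subtracting the model's keys from the clause's variables.
import Mathlib
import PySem

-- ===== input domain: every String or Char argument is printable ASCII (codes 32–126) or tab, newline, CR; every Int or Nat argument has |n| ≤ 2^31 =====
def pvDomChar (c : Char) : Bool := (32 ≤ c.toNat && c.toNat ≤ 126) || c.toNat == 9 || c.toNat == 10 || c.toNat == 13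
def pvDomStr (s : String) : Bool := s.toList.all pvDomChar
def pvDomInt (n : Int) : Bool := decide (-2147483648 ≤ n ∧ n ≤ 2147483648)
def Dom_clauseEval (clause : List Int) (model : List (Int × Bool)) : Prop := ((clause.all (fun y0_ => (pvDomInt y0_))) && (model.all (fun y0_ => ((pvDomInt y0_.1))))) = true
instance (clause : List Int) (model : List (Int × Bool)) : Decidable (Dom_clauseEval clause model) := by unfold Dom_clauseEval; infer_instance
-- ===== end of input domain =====

-- B replaces A's per-literal loop by set algebra: intersect the clause's positive/negated variables with the model's true/false variable sets, then set-subtract the model's keys; equivalence is about the return value only. Pre_ keeps the model association list duplicate-key-free, since a Python dict cannot carry duplicates.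


-- ===== PORT A =====
-- loop of A: early-return True, accumulator value ∈ {some false (False), none (None)}
def clauseEvalGo (model : List (Int × Bool)) : List Int → Option Bool → Option Bool
  | [], value => value
  | v :: rest, value =>
    let mv : Option Bool := PySem.Dict.get? (PySem.Dict.mk model) |v|
    if (mv = some true ∧ v > 0) ∨ (mv = some false ∧ v < 0) then some true
    else if mv = none then clauseEvalGo model rest none
    else clauseEvalGo model rest value

def clauseEval (clause : List Int) (model : List (Int × Bool)) : Option Bool :=
  clauseEvalGo model clause (some false)

-- ===== PORT B =====
-- set comprehensions over model.items() / the clause; sets are consumed only by intersection,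
-- difference and emptiness tests, where Python's set iteration order cannot matter
def clauseEval_alt (clause : List Int) (model : List (Int × Bool)) : Option Bool :=
  let m := PySem.Dict.mk model
  let trueVars : PySem.Set Int := PySem.Set.ofList ((m.items.filter (fun p => p.2)).map Prod.fst)
  let falseVars : PySem.Set Int := PySem.Set.ofList ((m.items.filter (fun p => !p.2)).map Prod.fst)
  let pos : PySem.Set Int := PySem.Set.ofList (clause.filter (fun v => 0 < v))
  let neg : PySem.Set Int := PySem.Set.ofList ((clause.filter (fun v => v < 0)).map (fun v => -v))
  if PySem.Set.inter pos trueVars ≠ [] ∨ PySem.Set.inter neg falseVars ≠ [] then some true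
  else if PySem.Set.diff (PySem.Set.ofList (clause.map (fun v => |v|))) m.keys ≠ [] then none
  else some false

-- ===== PRECONDITION & SPEC =====
-- Pre_ excludes model association lists with duplicate keys: A's `model` parameter is a Python
-- dict, which cannot hold duplicate keys, so such lists encode no Python input at all.
def Pre_clauseEval (clause : List Int) (model : List (Int × Bool)) : Prop :=
  (model.map Prod.fst).Nodup
instance (clause : List Int) (model : List (Int × Bool)) : Decidable (Pre_clauseEval clause model) := by unfold Pre_clauseEval; infer_instance
def pvWitness_clauseEval : List Int × (List (Int × Bool)) := ([1, -2, 3], [(1, false), (2, true)])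

def Spec_clauseEval (clause : List Int) (model : List (Int × Bool)) (out : Option Bool) : Prop := out = clauseEval_alt clause model
instance (clause : List Int) (model : List (Int × Bool)) (out : Option Bool) : Decidable (Spec_clauseEval clause model out) := by unfold Spec_clauseEval; infer_instance

-- ===== CLAIM (what is proved, stated in full; the proofs are below) =====
def Claim_equal_clauseEval : Prop := ∀ (clause : List Int) (model : List (Int × Bool)), Dom_clauseEval clause model → Pre_clauseEval clause model → Spec_clauseEval clause model (clauseEval clause model)

-- ===== LEMMAS AND PROOFS =====

-- three-valued truth value of one literal under the partial model (proof helper)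
def litval (model : List (Int × Bool)) (v : Int) : Option Bool :=
  let mv : Option Bool := PySem.Dict.get? (PySem.Dict.mk model) |v|
  if (mv = some true ∧ v > 0) ∨ (mv = some false ∧ v < 0) then some true
  else match mv with
  | none => none
  | some _ => some false

theorem clauseEvalGo_step (model : List (Int × Bool)) (v : Int) (rest : List Int) (value : Option Bool) :
    clauseEvalGo model (v :: rest) value =
      (match litval model v with
       | some true => some true
       | none => clauseEvalGo model rest none
       | some false => clauseEvalGo model rest value) := by
  conv_lhs => rw [clauseEvalGo]
  unfold litval
  by_cases h : (PySem.Dict.get? (PySem.Dict.mk model) |v| = some true ∧ v > 0) ∨ (PySem.Dict.get? (PySem.Dict.mk model) |v| = some false ∧ v < 0)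
  · simp only [if_pos h]
  · simp only [if_neg h]
    clear h
    cases PySem.Dict.get? (PySem.Dict.mk model) |v| with
    | none => simp
    | some b => simp

theorem clauseEvalGo_eq (model : List (Int × Bool)) (clause : List Int) (value : Option Bool) :
    clauseEvalGo model clause value =
      (if (clause.map (litval model)).any (fun x => x = some true) then some true
       else if (clause.map (litval model)).any (fun x => x = none) then none
       else value) := by
  induction clause generalizing value with
  | nil => simp [clauseEvalGo]
  | cons v rest ih =>
    rw [clauseEvalGo_step]
    cases hc : litval model v with
    | none => simp [hc, ih]
    | some b => cases b <;> simp [hc, ih]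

theorem litval_eq_some_true_iff (model : List (Int × Bool)) (v : Int) :
    litval model v = some true ↔
      (PySem.Dict.get? (PySem.Dict.mk model) |v| = some true ∧ v > 0) ∨
      (PySem.Dict.get? (PySem.Dict.mk model) |v| = some false ∧ v < 0) := by
  rcases hmv : PySem.Dict.get? (PySem.Dict.mk model) |v| with _ | b
  · simp [litval, hmv]
  · rcases b with _ | _ <;> simp only [litval, hmv] <;>
      split_ifs with h <;> simp_all

theorem litval_eq_none_iff (model : List (Int × Bool)) (v : Int) :
    litval model v = none ↔ PySem.Dict.get? (PySem.Dict.mk model) |v| = none := by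
  rcases hmv : PySem.Dict.get? (PySem.Dict.mk model) |v| with _ | b
  · simp [litval, hmv]
  · rcases b with _ | _ <;> simp only [litval, hmv] <;>
      split_ifs with h <;> simp_all

theorem ne_nil_iff_exists_mem {α : Type} (l : List α) : l ≠ [] ↔ ∃ x, x ∈ l := by
  rw [Ne, List.eq_nil_iff_forall_not_mem]
  push_neg
  rfl

theorem mem_trueVars (model : List (Int × Bool))
    (h : (model.map Prod.fst).Nodup) (x : Int) :
    x ∈ ((PySem.Dict.mk model).items.filter (fun p => p.2)).map Prod.fst ↔
      PySem.Dict.get? (PySem.Dict.mk model) x = some true := by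
  have hnd : (PySem.Dict.mk model).keys.Nodup := by
    simpa [PySem.Dict.keys, PySem.Dict.items] using h
  rw [PySem.Dict.get?_eq_some_iff_mem_items _ _ _ hnd]
  simp only [List.mem_map, List.mem_filter]
  constructor
  · rintro ⟨⟨a, c⟩, ⟨hm, hb⟩, rfl⟩
    simp only [] at hb
    cases c
    · simp at hb
    · exact hm
  · intro hm
    exact ⟨(x, true), ⟨hm, by simp⟩, rfl⟩

theorem mem_falseVars (model : List (Int × Bool))
    (h : (model.map Prod.fst).Nodup) (x : Int) :
    x ∈ ((PySem.Dict.mk model).items.filter (fun p => !p.2)).map Prod.fst ↔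
      PySem.Dict.get? (PySem.Dict.mk model) x = some false := by
  have hnd : (PySem.Dict.mk model).keys.Nodup := by
    simpa [PySem.Dict.keys, PySem.Dict.items] using h
  rw [PySem.Dict.get?_eq_some_iff_mem_items _ _ _ hnd]
  simp only [List.mem_map, List.mem_filter]
  constructor
  · rintro ⟨⟨a, c⟩, ⟨hm, hb⟩, rfl⟩
    cases c
    · exact hm
    · simp at hb
  · intro hm
    exact ⟨(x, false), ⟨hm, by simp⟩, rfl⟩

theorem clauseEval_spec : Claim_equal_clauseEval := by
  intro clause model _ hpre
  unfold Spec_clauseEval clauseEval clauseEval_alt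
  rw [clauseEvalGo_eq]
  have h1 : (PySem.Set.inter (PySem.Set.ofList (clause.filter (fun v => 0 < v)))
        (PySem.Set.ofList (((PySem.Dict.mk model).items.filter (fun p => p.2)).map Prod.fst)) ≠ [] ∨
      PySem.Set.inter (PySem.Set.ofList ((clause.filter (fun v => v < 0)).map (fun v => -v)))
        (PySem.Set.ofList (((PySem.Dict.mk model).items.filter (fun p => !p.2)).map Prod.fst)) ≠ []) ↔
      ((clause.map (litval model)).any (fun x => x = some true) = true) := by
    rw [List.any_eq_true]
    simp only [ne_nil_iff_exists_mem, PySem.Set.mem_inter, PySem.Set.mem_ofList,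
      mem_trueVars model hpre, mem_falseVars model hpre,
      List.mem_map, List.mem_filter, decide_eq_true_eq]
    constructor
    · rintro (⟨x, ⟨hx, hpos⟩, hT⟩ | ⟨x, ⟨v, ⟨hv, hneg⟩, rfl⟩, hF⟩)
      · refine ⟨litval model x, ⟨x, hx, rfl⟩, ?_⟩
        rw [litval_eq_some_true_iff]
        left
        exact ⟨by rwa [abs_of_pos hpos], hpos⟩
      · refine ⟨litval model v, ⟨v, hv, rfl⟩, ?_⟩
        rw [litval_eq_some_true_iff]
        right
        exact ⟨by rwa [abs_of_neg hneg], hneg⟩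
    · rintro ⟨_, ⟨v, hv, rfl⟩, hlv⟩
      rw [litval_eq_some_true_iff] at hlv
      rcases hlv with ⟨hg, hpos⟩ | ⟨hg, hneg⟩
      · exact Or.inl ⟨v, ⟨hv, hpos⟩, by rwa [abs_of_pos hpos] at hg⟩
      · exact Or.inr ⟨-v, ⟨v, ⟨hv, hneg⟩, rfl⟩, by rwa [abs_of_neg hneg] at hg⟩
  have h2 : (PySem.Set.diff (PySem.Set.ofList (clause.map (fun v => |v|)))
        (PySem.Dict.mk model).keys ≠ []) ↔
      ((clause.map (litval model)).any (fun x => x = none) = true) := by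
    rw [List.any_eq_true]
    simp only [ne_nil_iff_exists_mem, PySem.Set.mem_diff, PySem.Set.mem_ofList,
      List.mem_map, decide_eq_true_eq]
    constructor
    · rintro ⟨x, ⟨v, hv, rfl⟩, hk⟩
      refine ⟨litval model v, ⟨v, hv, rfl⟩, ?_⟩
      rw [litval_eq_none_iff, PySem.Dict.get?_eq_none_iff_not_mem_keys]
      exact hk
    · rintro ⟨_, ⟨v, hv, rfl⟩, hlv⟩
      rw [litval_eq_none_iff, PySem.Dict.get?_eq_none_iff_not_mem_keys] at hlv
      exact ⟨|v|, ⟨v, hv, rfl⟩, hlv⟩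
  simp only [h1, h2]
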